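-- pv_equiv track=rewrite | github.com/wolfy916/Algorithm | etc_problems/kakao/kakao_2020_undestroyed_structure.py | solution
-- ===== SOURCE A (Python) =====
-- def solution(board, skill):
--     n, m = len(board), len(board[0])
--     answer = 0
--     temp_board = [[0] * (m + 1) for _ in '_' * (n + 1)]
--     for subject, r1, c1, r2, c2, degree in skill:
--         temp = -1 * degree if subject == 1 else degree
--         temp_board[r1][c1] += temp
--         temp_board[r1][c2 + 1] += -temp
--         temp_board[r2 + 1][c1] += -temp
--         temp_board[r2 + 1][c2 + 1] += temp
--
--     for i in range(n + 1):
--         for j in range(m):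
--             temp_board[i][j + 1] += temp_board[i][j]
--
--     for i in range(n):
--         for j in range(m + 1):
--             temp_board[i + 1][j] += temp_board[i][j]
--
--     for i in range(n):
--         for j in range(m):
--             board[i][j] += temp_board[i][j]
--             # if board[i][j] + temp_board[i][j] > 0:
--             #     answer += 1
--     return board
-- ===== SOURCE B (Python) =====
-- def solution(board, skill):
--     def bonus(i, j):
--         t = 0
--         for s in skill:
--             if s[1] <= i <= s[3] and s[2] <= j <= s[4]:
--                 t += -s[5] if s[0] == 1 else s[5]
--         return t
--     return [[v + bonus(i, j) for j, v in enumerate(row)]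
--             for i, row in enumerate(board)]
-- ===== Notes on version B (the rewrite author's own statement) =====
-- stated objective: simpler
-- what changed: replaces the 2D difference array with its two prefix-sum passes and in-place mutation by a direct per-cell sum of the skills whose rectangle covers the cell, built as a fresh list
-- outside the precondition, e.g. on solution([[1, 2, 3]], [[2, 0, 2, 0, 0, 5]]): A returns [[1, -3, 3]], B returns [[1, 2, 3]]; on solution([[7]], [[2, -1, 0, -1, 0, 5]]): A returns [[2]], B returns [[7]]
import Mathlib
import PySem

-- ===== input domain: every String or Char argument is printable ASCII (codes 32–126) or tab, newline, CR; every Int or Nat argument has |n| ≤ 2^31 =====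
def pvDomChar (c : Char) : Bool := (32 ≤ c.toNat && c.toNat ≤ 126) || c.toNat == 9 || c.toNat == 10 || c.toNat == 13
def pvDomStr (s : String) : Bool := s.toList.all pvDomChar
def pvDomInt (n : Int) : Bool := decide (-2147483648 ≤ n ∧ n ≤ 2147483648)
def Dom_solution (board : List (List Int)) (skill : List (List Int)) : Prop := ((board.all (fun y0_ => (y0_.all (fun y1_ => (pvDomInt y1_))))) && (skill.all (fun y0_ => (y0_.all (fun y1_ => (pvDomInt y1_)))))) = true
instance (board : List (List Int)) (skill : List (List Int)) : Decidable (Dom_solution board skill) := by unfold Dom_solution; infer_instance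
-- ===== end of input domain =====

-- B replaces A's 2D difference array + two prefix-sum passes by a direct per-cell sum of the
-- covering skills (objective: simpler).  A mutates `board` in place and returns it; B builds a
-- fresh list — the equivalence proved here is about the RETURN value only.

-- ===== PORT A =====

-- Python `tb[r][c] += v` for Nat indices known in range (the loop passes of A).
def updN (tb : List (List Int)) (r c : Nat) (v : Int) : List (List Int) :=
  tb.modify r (fun row => row.modify c (· + v))

-- Python `tb[i][j] += v` for Int indices: negative indices wrap; a genuinely
-- out-of-range index raises IndexError in Python (excluded by Pre_; no-op here).
def updI (tb : List (List Int)) (i j : Int) (v : Int) : List (List Int) :=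
  let r := if i < 0 then i + tb.length else i
  if 0 ≤ r then
    tb.modify r.toNat (fun row =>
      let c := if j < 0 then j + row.length else j
      if 0 ≤ c then row.modify c.toNat (· + v) else row)
  else tb

-- Python read `tb[i][j]` at Nat indices; A only reads in range (shape (n+1)×(m+1)).
def get2 (tb : List (List Int)) (i j : Nat) : Int := (tb.getD i []).getD j 0

-- the body of A's `for subject, r1, c1, r2, c2, degree in skill` loop
-- (tuple unpacking raises ValueError on a row that is not 6 long: excluded by Pre_)
def stepA (tb : List (List Int)) (s : List Int) : List (List Int) :=
  match s with
  | [subject, r1, c1, r2, c2, degree] =>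
    let temp := if subject == 1 then -1 * degree else degree
    updI (updI (updI (updI tb r1 c1 temp) r1 (c2+1) (-temp)) (r2+1) c1 (-temp)) (r2+1) (c2+1) temp
  | _ => tb

def solution (board : List (List Int)) (skill : List (List Int)) : List (List Int) :=
  let n := board.length
  let m := ((PySem.List.pyGet? board 0).getD []).length   -- board[0] raises on empty board (excluded by Pre_)
  let tb1 := skill.foldl stepA
    (List.replicate (n+1) (List.replicate (m+1) (0:Int)))
  let tb2 := (List.range (n+1)).foldl (fun tb i =>
    (List.range m).foldl (fun tb j => updN tb i (j+1) (get2 tb i j)) tb) tb1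
  let tb3 := (List.range n).foldl (fun tb i =>
    (List.range (m+1)).foldl (fun tb j => updN tb (i+1) j (get2 tb i j)) tb) tb2
  (List.range n).foldl (fun bd i =>
    (List.range m).foldl (fun bd j => updN bd i j (get2 tb3 i j)) bd) board

-- ===== PORT B =====

-- Source B's `bonus(i, j)`: the reads s[k] are in range for the 6-long rows Pre_ admits.
def bonus (skill : List (List Int)) (i j : Int) : Int :=
  skill.foldl (fun t s =>
    if s.getD 1 0 ≤ i ∧ i ≤ s.getD 3 0 ∧ s.getD 2 0 ≤ j ∧ j ≤ s.getD 4 0 then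
      t + (if s.getD 0 0 == 1 then -s.getD 5 0 else s.getD 5 0)
    else t) 0

def solution_alt (board : List (List Int)) (skill : List (List Int)) : List (List Int) :=
  (PySem.List.enumerate board).map (fun p =>
    (PySem.List.enumerate p.2).map (fun q => q.2 + bonus skill p.1 q.1))

-- ===== PRECONDITION & SPEC =====

def SkillOK (n m : Nat) (s : List Int) : Prop :=
  s.length = 6 ∧
  0 ≤ s.getD 1 0 ∧ s.getD 1 0 ≤ s.getD 3 0 ∧ s.getD 3 0 < (n:Int) ∧
  0 ≤ s.getD 2 0 ∧ s.getD 2 0 ≤ s.getD 4 0 ∧ s.getD 4 0 < (m:Int)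

-- Pre_ admits the problem's natural domain: a nonempty board whose rows are at least as long as
-- row 0, and skills that are six values [subject, r1, c1, r2, c2, degree] with a well-formed
-- in-range rectangle 0 ≤ r1 ≤ r2 < n, 0 ≤ c1 ≤ c2 < m.  It excludes inputs on which A raises
-- (empty board, a too-short row, a skill row that is not 6 long, an index past the difference
-- array) and the degenerate skills — inverted (r1 > r2 or c1 > c2) or negative rectangles —
-- where no rectangle is specified and A's wraparound/difference-array values are as arbitrary
-- as B's no-op.
def Pre_solution (board : List (List Int)) (skill : List (List Int)) : Prop :=
  board ≠ [] ∧
  (∀ row ∈ board, (board.headD []).length ≤ row.length) ∧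
  (∀ s ∈ skill, SkillOK board.length (board.headD []).length s)

instance (board : List (List Int)) (skill : List (List Int)) : Decidable (Pre_solution board skill) := by
  unfold Pre_solution SkillOK; infer_instance

def pvWitness_solution : List (List Int) × List (List Int) := ([[0, 1], [2, 3]], [[1, 0, 0, 1, 1, 2]])

def Spec_solution (board : List (List Int)) (skill : List (List Int)) (out : List (List Int)) : Prop := out = solution_alt board skill
instance (board : List (List Int)) (skill : List (List Int)) (out : List (List Int)) : Decidable (Spec_solution board skill out) := by unfold Spec_solution; infer_instance

-- ===== CLAIM (what is proved, stated in full; the proofs are below) =====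
def Claim_equal_solution : Prop := ∀ (board : List (List Int)) (skill : List (List Int)), Dom_solution board skill → Pre_solution board skill → Spec_solution board skill (solution board skill)

-- ===== LEMMAS AND PROOFS =====

-- Σ_{t < k} f t
def S (k : Nat) (f : Nat → Int) : Int := ((List.range k).map f).sum

-- the contribution of one skill row to cell (i,j) of A's difference array
def dlt (s : List Int) (i j : Nat) : Int :=
  match s with
  | [subject, r1, c1, r2, c2, degree] =>
    ((if subject == 1 then -1 * degree else degree) *
      ((if (i:Int) = r1 then 1 else 0) - (if (i:Int) = r2 + 1 then 1 else 0))) *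
      ((if (j:Int) = c1 then 1 else 0) - (if (j:Int) = c2 + 1 then 1 else 0))
  | _ => 0

lemma length_updN (tb : List (List Int)) (r c : Nat) (v : Int) :
    (updN tb r c v).length = tb.length := by
  simp [updN]

lemma row_updN (tb : List (List Int)) (r c : Nat) (v : Int) (i : Nat) :
    ((updN tb r c v).getD i []).length = (tb.getD i []).length := by
  simp only [updN, List.getD_eq_getElem?_getD, List.getElem?_modify]
  cases h : tb[i]? with
  | none => rfl
  | some row => by_cases hri : r = i <;> simp [hri]

lemma get2_updN (tb : List (List Int)) (r c : Nat) (v : Int)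
    (hr : r < tb.length) (hc : c < (tb.getD r []).length) (i j : Nat) :
    get2 (updN tb r c v) i j = get2 tb i j + (if i = r ∧ j = c then v else 0) := by
  unfold get2 updN
  simp only [List.getD_eq_getElem?_getD, List.getElem?_modify]
  by_cases hir : i = r
  · subst hir
    rw [List.getElem?_eq_getElem hr]
    have hrow : (tb.getD i []) = tb[i] := List.getD_eq_getElem tb [] hr
    rw [hrow] at hc
    by_cases hjc : j = c
    · subst hjc
      simp [List.getElem?_eq_getElem hc]
    · have : c ≠ j := fun h => hjc h.symm
      simp [this, hjc]
  · have : r ≠ i := fun h => hir h.symm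
    simp [this, hir]

lemma updI_eq (tb : List (List Int)) (i j v : Int) (hi : 0 ≤ i) (hj : 0 ≤ j) :
    updI tb i j v = updN tb i.toNat j.toNat v := by
  unfold updI updN
  simp [not_lt.mpr hi, not_lt.mpr hj, hi, hj]

-- shape of the temp board: n+1 rows of length m+1
def Shp2 (n m : Nat) (tb : List (List Int)) : Prop :=
  tb.length = n + 1 ∧ ∀ i, (tb.getD i []).length = if i < n + 1 then m + 1 else 0

lemma Shp2_updN (n m : Nat) (tb : List (List Int)) (r c : Nat) (v : Int)
    (h : Shp2 n m tb) : Shp2 n m (updN tb r c v) := by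
  exact ⟨by rw [length_updN]; exact h.1, fun i => by rw [row_updN]; exact h.2 i⟩

lemma foldl_inv {α σ : Type} (P : σ → Prop) (step : σ → α → σ) (l : List α)
    (h : ∀ s a, P s → P (step s a)) (s : σ) (hs : P s) : P (l.foldl step s) := by
  induction l generalizing s with
  | nil => exact hs
  | cons a l ih => exact ih _ (h _ _ hs)

lemma S_succ (k : Nat) (f : Nat → Int) : S (k+1) f = S k f + f k := by
  simp [S, List.range_succ]

lemma S_congr {k : Nat} {f g : Nat → Int} (h : ∀ t, t < k → f t = g t) : S k f = S k g := by
  simp only [S]; exact congrArg _ (List.map_congr_left fun t ht => h t (List.mem_range.mp ht))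

lemma S_zero (k : Nat) : S k (fun _ => (0:Int)) = 0 := by
  simp [S]

lemma S_add (k : Nat) (f g : Nat → Int) : S k (fun t => f t + g t) = S k f + S k g :=
  PySem.List.sum_map_add_int (List.range k) f g

lemma S_mul_left (k : Nat) (a : Int) (f : Nat → Int) : S k (fun t => a * f t) = a * S k f := by
  simpa [S] using List.sum_map_mul_left (List.range k) f a

lemma S_ite (a : Int) (k : Nat) :
    S k (fun t => if (t:Int) = a then (1:Int) else 0) = if 0 ≤ a ∧ a < (k:Int) then 1 else 0 := by
  induction k with
  | zero =>
    simp only [S, List.range_zero, List.map_nil, List.sum_nil]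
    omega
  | succ k ih => rw [S_succ, ih]; split_ifs <;> omega

lemma list6_of_len (s : List Int) (h : s.length = 6) :
    ∃ a b c d e f, s = [a, b, c, d, e, f] := by
  match s, h with
  | [a, b, c, d, e, f], _ => exact ⟨a, b, c, d, e, f, rfl⟩

-- one skill-fold step adds dlt to every cell
lemma get2_stepA (n m : Nat) (tb : List (List Int)) (s : List Int)
    (hs : SkillOK n m s) (h : Shp2 n m tb) (i j : Nat) :
    get2 (stepA tb s) i j
    = get2 tb i j + dlt s i j := by
  obtain ⟨a, r1, c1, r2, c2, d, rfl⟩ := list6_of_len s hs.1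
  simp [SkillOK, List.getD] at hs
  obtain ⟨h1, h2, h3, h4, h5, h6⟩ := hs
  have hshape : ∀ (tb' : List (List Int)), Shp2 n m tb' → ∀ r : Nat, r < n + 1 →
      ∀ c : Int, 0 ≤ c → c < (m:Int) + 1 → c.toNat < (tb'.getD r []).length := by
    intro tb' h' r hrn c hc0 hcm
    rw [h'.2 r, if_pos hrn]; omega
  simp only [stepA]
  have hr2p : (0:Int) ≤ r2 + 1 := by omega
  have hc2p : (0:Int) ≤ c2 + 1 := by omega
  rw [updI_eq _ (r2+1) (c2+1) _ hr2p hc2p,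
      updI_eq _ (r2+1) c1 _ hr2p h4,
      updI_eq _ r1 (c2+1) _ h1 hc2p,
      updI_eq _ r1 c1 _ h1 h4]
  have s0 := Shp2_updN n m tb r1.toNat c1.toNat (if a == 1 then -1 * d else d) h
  have s1 := Shp2_updN n m _ r1.toNat (c2+1).toNat (-(if a == 1 then -1 * d else d)) s0
  have s2 := Shp2_updN n m _ (r2+1).toNat c1.toNat (-(if a == 1 then -1 * d else d)) s1
  rw [get2_updN _ _ _ _ (by rw [(s2).1]; omega)
        (hshape _ s2 (r2+1).toNat (by omega) (c2+1) (by omega) (by omega)),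
      get2_updN _ _ _ _ (by rw [(s1).1]; omega)
        (hshape _ s1 (r2+1).toNat (by omega) c1 (by omega) (by omega)),
      get2_updN _ _ _ _ (by rw [(s0).1]; omega)
        (hshape _ s0 r1.toNat (by omega) (c2+1) (by omega) (by omega)),
      get2_updN _ _ _ _ (by rw [h.1]; omega)
        (hshape _ h r1.toNat (by omega) c1 (by omega) (by omega))]
  simp only [dlt]
  have er1 : (i = r1.toNat) ↔ ((i:Int) = r1) := by omega
  have er2 : (i = (r2+1).toNat) ↔ ((i:Int) = r2 + 1) := by omega
  have ec1 : (j = c1.toNat) ↔ ((j:Int) = c1) := by omega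
  have ec2 : (j = (c2+1).toNat) ↔ ((j:Int) = c2 + 1) := by omega
  simp only [er1, er2, ec1, ec2]
  by_cases p1 : (i:Int) = r1 <;> by_cases p2 : (i:Int) = r2 + 1 <;>
    by_cases q1 : (j:Int) = c1 <;> by_cases q2 : (j:Int) = c2 + 1 <;>
    simp [p1, p2, q1, q2] <;> (try split_ifs) <;> first | ring1 | (exfalso; omega)

lemma Shp2_stepA (n m : Nat) (tb : List (List Int)) (s : List Int)
    (hs : SkillOK n m s) (h : Shp2 n m tb) :
    Shp2 n m (stepA tb s) := by
  obtain ⟨a, r1, c1, r2, c2, d, rfl⟩ := list6_of_len s hs.1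
  simp [SkillOK, List.getD] at hs
  obtain ⟨h1, h2, h3, h4, h5, h6⟩ := hs
  simp only [stepA]
  have hr2p : (0:Int) ≤ r2 + 1 := by omega
  have hc2p : (0:Int) ≤ c2 + 1 := by omega
  rw [updI_eq _ (r2+1) (c2+1) _ hr2p hc2p,
      updI_eq _ (r2+1) c1 _ hr2p h4,
      updI_eq _ r1 (c2+1) _ h1 hc2p,
      updI_eq _ r1 c1 _ h1 h4]
  exact Shp2_updN n m _ _ _ _ (Shp2_updN n m _ _ _ _ (Shp2_updN n m _ _ _ _
    (Shp2_updN n m _ _ _ _ h)))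

lemma skill_fold (n m : Nat) (skill : List (List Int)) (tb : List (List Int))
    (hall : ∀ s ∈ skill, SkillOK n m s) (h : Shp2 n m tb) (i j : Nat) :
    get2 (skill.foldl stepA tb) i j
    = get2 tb i j + (skill.map (fun s => dlt s i j)).sum := by
  induction skill generalizing tb with
  | nil => simp
  | cons s rest ih =>
    simp only [List.foldl_cons, List.map_cons, List.sum_cons]
    rw [ih _ (fun x hx => hall x (List.mem_cons_of_mem _ hx))
        (Shp2_stepA n m tb s (hall s (List.mem_cons_self)) h),
      get2_stepA n m tb s (hall s (List.mem_cons_self)) h]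
    ring

lemma Shp2_skill_fold (n m : Nat) (skill : List (List Int)) (tb : List (List Int))
    (hall : ∀ s ∈ skill, SkillOK n m s) (h : Shp2 n m tb) :
    Shp2 n m (skill.foldl stepA tb) := by
  induction skill generalizing tb with
  | nil => exact h
  | cons s rest ih =>
    exact ih _ (fun x hx => hall x (List.mem_cons_of_mem _ hx))
      (Shp2_stepA n m tb s (hall s (List.mem_cons_self)) h)

lemma Shp2_inner2 (n m : Nat) (tb : List (List Int)) (hsh : Shp2 n m tb) (i k : Nat) :
    Shp2 n m ((List.range k).foldl (fun tb j => updN tb i (j+1) (get2 tb i j)) tb) :=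
  foldl_inv _ _ _ (fun tb j h => Shp2_updN n m tb i (j+1) _ h) tb hsh

-- row prefix pass, inner loop on one row i
lemma inner2 (n m : Nat) (tb : List (List Int)) (hsh : Shp2 n m tb) (i : Nat) (hi : i < n + 1)
    (k : Nat) : k ≤ m → ∀ i' j,
    get2 ((List.range k).foldl (fun tb j => updN tb i (j+1) (get2 tb i j)) tb) i' j
    = if i' = i ∧ j ≤ k then S (j+1) (get2 tb i) else get2 tb i' j := by
  induction k with
  | zero =>
    intro _ i' j
    simp only [List.range_zero, List.foldl_nil]
    split_ifs with h
    · obtain ⟨rfl, hj⟩ := h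
      have : j = 0 := by omega
      subst this
      rw [S_succ]
      simp [S]
    · rfl
  | succ k ih =>
    intro hk i' j
    rw [List.range_succ, List.foldl_append, List.foldl_cons, List.foldl_nil]
    have hk' : k ≤ m := by omega
    have hsh' := Shp2_inner2 n m tb hsh i k
    have hread : get2 ((List.range k).foldl (fun tb j => updN tb i (j+1) (get2 tb i j)) tb) i k
        = S (k+1) (get2 tb i) := by
      rw [ih hk' i k]
      simp
    rw [get2_updN _ _ _ _ (by rw [hsh'.1]; omega)
          (by rw [hsh'.2 i, if_pos hi]; omega) i' j,
        hread, ih hk' i' j]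
    by_cases hii : i' = i
    · subst hii
      by_cases hj1 : j ≤ k
      · simp [hj1, show j ≤ k + 1 by omega, show ¬(j = k + 1) by omega]
      · by_cases hj2 : j = k + 1
        · subst hj2
          rw [if_neg (by omega), if_pos ⟨rfl, rfl⟩, if_pos ⟨rfl, le_rfl⟩,
            S_succ (k+1) (get2 tb i')]
          ring
        · simp [hj1, hj2, show ¬(j ≤ k + 1) by omega]
    · simp [hii]

lemma Shp2_outer2 (n m : Nat) (tb : List (List Int)) (hsh : Shp2 n m tb) (K : Nat) :
    Shp2 n m ((List.range K).foldl (fun tb i =>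
      (List.range m).foldl (fun tb j => updN tb i (j+1) (get2 tb i j)) tb) tb) :=
  foldl_inv _ _ _ (fun tb i h => Shp2_inner2 n m tb h i m) tb hsh

-- row prefix pass, all rows
lemma outer2 (n m : Nat) (tb : List (List Int)) (hsh : Shp2 n m tb) (K : Nat) : K ≤ n + 1 →
    ∀ i j,
    get2 ((List.range K).foldl (fun tb i =>
      (List.range m).foldl (fun tb j => updN tb i (j+1) (get2 tb i j)) tb) tb) i j
    = if i < K ∧ j ≤ m then S (j+1) (get2 tb i) else get2 tb i j := by
  induction K with
  | zero => intro _ i j; simp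
  | succ K ih =>
    intro hK i j
    rw [List.range_succ, List.foldl_append, List.foldl_cons, List.foldl_nil]
    have hK' : K ≤ n + 1 := by omega
    have hsh' := Shp2_outer2 n m tb hsh K
    rw [inner2 n m _ hsh' K (by omega) m le_rfl i j]
    by_cases hii : i = K
    · subst hii
      by_cases hj : j ≤ m
      · have : S (j+1) (get2 ((List.range i).foldl (fun tb i =>
            (List.range m).foldl (fun tb j => updN tb i (j+1) (get2 tb i j)) tb) tb) i)
            = S (j+1) (get2 tb i) := by
          apply S_congr
          intro t _
          rw [ih hK' i t]
          simp
        simp [hj, this]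
      · simp [hj, ih hK' i j]
    · by_cases hiK : i < K
      · simp [hii, ih hK' i j, hiK, show i < K + 1 by omega]
      · simp [hii, ih hK' i j, hiK, show ¬(i < K + 1) by omega]

lemma Shp2_inner3 (n m : Nat) (tb : List (List Int)) (hsh : Shp2 n m tb) (i k : Nat) :
    Shp2 n m ((List.range k).foldl (fun tb j => updN tb (i+1) j (get2 tb i j)) tb) :=
  foldl_inv _ _ _ (fun tb j h => Shp2_updN n m tb (i+1) j _ h) tb hsh

-- column prefix pass, inner loop for one outer index i
lemma inner3 (n m : Nat) (tb : List (List Int)) (hsh : Shp2 n m tb) (i : Nat) (hi : i < n)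
    (k : Nat) : k ≤ m + 1 → ∀ i' j,
    get2 ((List.range k).foldl (fun tb j => updN tb (i+1) j (get2 tb i j)) tb) i' j
    = if i' = i + 1 ∧ j < k then get2 tb (i+1) j + get2 tb i j else get2 tb i' j := by
  induction k with
  | zero =>
    intro _ i' j
    simp
  | succ k ih =>
    intro hk i' j
    rw [List.range_succ, List.foldl_append, List.foldl_cons, List.foldl_nil]
    have hk' : k ≤ m + 1 := by omega
    have hsh' := Shp2_inner3 n m tb hsh i k
    have hread : get2 ((List.range k).foldl (fun tb j => updN tb (i+1) j (get2 tb i j)) tb) i k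
        = get2 tb i k := by
      rw [ih hk' i k, if_neg (by omega)]
    rw [get2_updN _ _ _ _ (by rw [hsh'.1]; omega)
          (by rw [hsh'.2 (i+1), if_pos (by omega)]; omega) i' j,
        hread, ih hk' i' j]
    by_cases hii : i' = i + 1
    · subst hii
      by_cases hj1 : j < k
      · simp [hj1, show j < k + 1 by omega, show ¬(j = k) by omega]
      · by_cases hj2 : j = k
        · subst hj2
          rw [if_neg (by omega), if_pos ⟨rfl, rfl⟩, if_pos ⟨rfl, by omega⟩]
        · simp [hj1, hj2, show ¬(j < k + 1) by omega]
    · simp [hii]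

lemma get2_big (n m : Nat) (tb : List (List Int)) (hsh : Shp2 n m tb) (i j : Nat)
    (hj : m + 1 ≤ j) : get2 tb i j = 0 := by
  unfold get2
  apply List.getD_eq_default
  rw [hsh.2 i]
  split <;> omega

-- column prefix pass, all rows
lemma outer3 (n m : Nat) (tb : List (List Int)) (hsh : Shp2 n m tb) (K : Nat) : K ≤ n →
    ∀ i j,
    get2 ((List.range K).foldl (fun tb i =>
      (List.range (m+1)).foldl (fun tb j => updN tb (i+1) j (get2 tb i j)) tb) tb) i j
    = if i ≤ K then S (i+1) (fun t => get2 tb t j) else get2 tb i j := by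
  induction K with
  | zero =>
    intro _ i j
    split_ifs with h
    · have : i = 0 := by omega
      subst this
      rw [S_succ]
      simp [S]
    · rfl
  | succ K ih =>
    intro hK i j
    rw [show List.range (K+1) = List.range K ++ [K] from List.range_succ,
        List.foldl_append, List.foldl_cons, List.foldl_nil]
    have hK' : K ≤ n := by omega
    have hsh' : Shp2 n m ((List.range K).foldl (fun tb i =>
        (List.range (m+1)).foldl (fun tb j => updN tb (i+1) j (get2 tb i j)) tb) tb) :=
      foldl_inv _ _ _ (fun tb i h => Shp2_inner3 n m tb h i (m+1)) tb hsh
    rw [inner3 n m _ hsh' K (by omega) (m+1) le_rfl i j]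
    have hKK : get2 ((List.range K).foldl (fun tb i =>
        (List.range (m+1)).foldl (fun tb j => updN tb (i+1) j (get2 tb i j)) tb) tb) K j
        = S (K+1) (fun t => get2 tb t j) := by
      rw [ih hK' K j, if_pos le_rfl]
    have hK1 : get2 ((List.range K).foldl (fun tb i =>
        (List.range (m+1)).foldl (fun tb j => updN tb (i+1) j (get2 tb i j)) tb) tb) (K+1) j
        = get2 tb (K+1) j := by
      rw [ih hK' (K+1) j, if_neg (by omega)]
    by_cases hii : i = K + 1
    · subst hii
      by_cases hj : j < m + 1
      · rw [if_pos ⟨rfl, hj⟩, hKK, hK1, if_pos le_rfl, S_succ (K+1)]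
        ring
      · rw [if_neg (by omega), hK1, if_pos le_rfl]
        have hz : ∀ t, get2 tb t j = 0 := fun t => get2_big n m tb hsh t j (by omega)
        rw [hz (K+1), S_congr (fun t _ => hz t), S_zero]
    · by_cases hiK : i ≤ K
      · rw [if_neg (by omega), ih hK' i j, if_pos hiK, if_pos (by omega)]
      · rw [if_neg (by omega), ih hK' i j, if_neg hiK, if_neg (by omega)]

-- final pass over the board: adds the FIXED grid w into the board
def ShpB (board bd : List (List Int)) : Prop :=
  bd.length = board.length ∧ ∀ t, (bd.getD t []).length = (board.getD t []).length

lemma ShpB_updN (board bd : List (List Int)) (r c : Nat) (v : Int) (h : ShpB board bd) :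
    ShpB board (updN bd r c v) :=
  ⟨by rw [length_updN]; exact h.1, fun t => by rw [row_updN]; exact h.2 t⟩

lemma ShpB_innerF (board : List (List Int)) (w : Nat → Int) (bd : List (List Int))
    (hsh : ShpB board bd) (i k : Nat) :
    ShpB board ((List.range k).foldl (fun bd j => updN bd i j (w j)) bd) :=
  foldl_inv _ _ _ (fun bd j h => ShpB_updN board bd i j _ h) bd hsh

lemma innerF (board : List (List Int)) (w : Nat → Int) (m : Nat) (bd : List (List Int))
    (hsh : ShpB board bd) (i : Nat) (hi : i < board.length)
    (hm : m ≤ (board.getD i []).length) (k : Nat) : k ≤ m → ∀ i' j,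
    get2 ((List.range k).foldl (fun bd j => updN bd i j (w j)) bd) i' j
    = get2 bd i' j + (if i' = i ∧ j < k then w j else 0) := by
  induction k with
  | zero =>
    intro _ i' j
    simp
  | succ k ih =>
    intro hk i' j
    rw [List.range_succ, List.foldl_append, List.foldl_cons, List.foldl_nil]
    have hk' : k ≤ m := by omega
    have hsh' := ShpB_innerF board w bd hsh i k
    rw [get2_updN _ _ _ _ (by rw [hsh'.1]; omega)
          (by rw [hsh'.2 i]; omega) i' j,
        ih hk' i' j]
    by_cases hii : i' = i
    · subst hii
      by_cases hj1 : j < k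
      · simp [hj1, show j < k + 1 by omega, show ¬(j = k) by omega]
      · by_cases hj2 : j = k
        · subst hj2
          rw [if_neg (by omega), if_pos ⟨rfl, rfl⟩, if_pos ⟨rfl, by omega⟩]
          ring
        · simp [hj1, hj2, show ¬(j < k + 1) by omega]
    · simp [hii]

lemma outerF (board : List (List Int)) (w : Nat → Nat → Int) (m : Nat)
    (bd : List (List Int)) (hsh : ShpB board bd)
    (hm : ∀ i, i < board.length → m ≤ (board.getD i []).length) (K : Nat) :
    K ≤ board.length → ∀ i j,
    get2 ((List.range K).foldl (fun bd i =>
      (List.range m).foldl (fun bd j => updN bd i j (w i j)) bd) bd) i j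
    = get2 bd i j + (if i < K ∧ j < m then w i j else 0) := by
  induction K with
  | zero =>
    intro _ i j
    simp
  | succ K ih =>
    intro hK i j
    rw [List.range_succ, List.foldl_append, List.foldl_cons, List.foldl_nil]
    have hK' : K ≤ board.length := by omega
    have hsh' : ShpB board ((List.range K).foldl (fun bd i =>
        (List.range m).foldl (fun bd j => updN bd i j (w i j)) bd) bd) :=
      foldl_inv _ _ _ (fun bd i h => ShpB_innerF board (w i) bd h i m) bd hsh
    rw [innerF board (w K) m _ hsh' K (by omega) (hm K (by omega)) m le_rfl i j,
        ih hK' i j]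
    by_cases hii : i = K
    · subst hii
      by_cases hj : j < m
      · rw [if_neg (show ¬(i < i ∧ j < m) by omega), if_pos ⟨rfl, hj⟩,
            if_pos (show i < i + 1 ∧ j < m from ⟨by omega, hj⟩)]
        ring
      · rw [if_neg (by omega), if_neg (by omega), if_neg (by omega)]
        ring
    · by_cases hiK : i < K
      · by_cases hj : j < m
        · rw [if_pos ⟨hiK, hj⟩, if_neg (by omega), if_pos ⟨by omega, hj⟩]
          ring
        · rw [if_neg (by omega), if_neg (by omega), if_neg (by omega)]
          ring
      · rw [if_neg (by omega), if_neg (by omega), if_neg (by omega)]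
        ring

lemma ShpB_outerF (board : List (List Int)) (w : Nat → Nat → Int) (m : Nat)
    (bd : List (List Int)) (hsh : ShpB board bd) (K : Nat) :
    ShpB board ((List.range K).foldl (fun bd i =>
      (List.range m).foldl (fun bd j => updN bd i j (w i j)) bd) bd) :=
  foldl_inv _ _ _ (fun bd i h => ShpB_innerF board (w i) bd h i m) bd hsh

-- swapping a sum over a range with a sum over the skill list
lemma S_sub (k : Nat) (f g : Nat → Int) : S k (fun t => f t - g t) = S k f - S k g := by
  induction k with
  | zero => simp [S]
  | succ k ih => simp only [S_succ, ih]; ring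

lemma sum_S_comm {α : Type} (l : List α) (k : Nat) (f : α → Nat → Int) :
    S k (fun t => (l.map (fun a => f a t)).sum) = (l.map (fun a => S k (f a))).sum := by
  induction l with
  | nil => simpa using S_zero k
  | cons a l ih =>
    simp only [List.map_cons, List.sum_cons]
    rw [← ih, ← S_add]

-- the double prefix sum of one skill's dlt is exactly B's per-cell test
lemma dlt_sum (n m : Nat) (s : List Int) (hs : SkillOK n m s) (i j : Nat) :
    S (i+1) (fun i' => S (j+1) (fun j' => dlt s i' j'))
    = if s.getD 1 0 ≤ (i:Int) ∧ (i:Int) ≤ s.getD 3 0 ∧ s.getD 2 0 ≤ (j:Int) ∧ (j:Int) ≤ s.getD 4 0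
      then (if s.getD 0 0 == 1 then -s.getD 5 0 else s.getD 5 0) else 0 := by
  obtain ⟨a, r1, c1, r2, c2, d, rfl⟩ := list6_of_len s hs.1
  simp [SkillOK, List.getD] at hs
  obtain ⟨h1, h2, h3, h4, h5, h6⟩ := hs
  have hd : ∀ i' j' : Nat, dlt [a, r1, c1, r2, c2, d] i' j'
      = ((if a == 1 then -1 * d else d) *
          ((if (i':Int) = r1 then 1 else 0) - (if (i':Int) = r2 + 1 then 1 else 0))) *
        ((if (j':Int) = c1 then 1 else 0) - (if (j':Int) = c2 + 1 then 1 else 0)) :=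
    fun i' j' => rfl
  have hinner : ∀ i' : Nat, S (j+1) (fun j' => dlt [a, r1, c1, r2, c2, d] i' j')
      = ((if a == 1 then -1 * d else d) *
          ((if (i':Int) = r1 then 1 else 0) - (if (i':Int) = r2 + 1 then 1 else 0))) *
        ((if 0 ≤ c1 ∧ c1 < ((j+1 : Nat):Int) then 1 else 0)
          - (if 0 ≤ c2 + 1 ∧ c2 + 1 < ((j+1 : Nat):Int) then 1 else 0)) := by
    intro i'
    rw [S_congr (fun t _ => hd i' t), S_mul_left, S_sub, S_ite, S_ite]
  rw [S_congr (fun t _ => hinner t), S_congr (fun i' _ => by ring :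
      ∀ i' : Nat, i' < i + 1 → ((if a == 1 then -1 * d else d) *
          ((if (i':Int) = r1 then 1 else 0) - (if (i':Int) = r2 + 1 then 1 else 0))) *
        ((if 0 ≤ c1 ∧ c1 < ((j+1 : Nat):Int) then 1 else 0)
          - (if 0 ≤ c2 + 1 ∧ c2 + 1 < ((j+1 : Nat):Int) then 1 else 0))
      = ((if a == 1 then -1 * d else d) *
          ((if 0 ≤ c1 ∧ c1 < ((j+1 : Nat):Int) then 1 else 0)
            - (if 0 ≤ c2 + 1 ∧ c2 + 1 < ((j+1 : Nat):Int) then 1 else 0))) *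
        ((if (i':Int) = r1 then 1 else 0) - (if (i':Int) = r2 + 1 then 1 else 0))),
    S_mul_left, S_sub, S_ite, S_ite]
  simp only [List.getD]
  norm_num
  split_ifs <;> first | ring1 | (exfalso; omega)

-- B's bonus as a map-sum
lemma bonus_eq (skill : List (List Int)) (i j : Int) :
    bonus skill i j = (skill.map (fun s =>
      if s.getD 1 0 ≤ i ∧ i ≤ s.getD 3 0 ∧ s.getD 2 0 ≤ j ∧ j ≤ s.getD 4 0 then
        (if s.getD 0 0 == 1 then -s.getD 5 0 else s.getD 5 0) else 0)).sum := by
  unfold bonus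
  have h : (fun (t : Int) (s : List Int) =>
      if s.getD 1 0 ≤ i ∧ i ≤ s.getD 3 0 ∧ s.getD 2 0 ≤ j ∧ j ≤ s.getD 4 0 then
        t + (if s.getD 0 0 == 1 then -s.getD 5 0 else s.getD 5 0)
      else t)
    = fun (t : Int) (s : List Int) => t +
      (if s.getD 1 0 ≤ i ∧ i ≤ s.getD 3 0 ∧ s.getD 2 0 ≤ j ∧ j ≤ s.getD 4 0 then
        (if s.getD 0 0 == 1 then -s.getD 5 0 else s.getD 5 0) else 0) := by
    funext t s
    split <;> simp
  rw [h, PySem.List.foldl_add, zero_add]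

lemma bonus_zero (n m : Nat) (skill : List (List Int))
    (hall : ∀ s ∈ skill, SkillOK n m s) (i j : Int) (hj : (m:Int) ≤ j) :
    bonus skill i j = 0 := by
  rw [bonus_eq]
  apply List.sum_eq_zero
  intro x hx
  rcases List.mem_map.mp hx with ⟨s, hs, rfl⟩
  have h := hall s hs
  rw [if_neg]
  rintro ⟨-, -, -, h4⟩
  have := h.2.2.2.2.2.2
  omega

lemma get2_zero (R C i j : Nat) :
    get2 (List.replicate R (List.replicate C (0:Int))) i j = 0 := by
  unfold get2
  simp only [List.getD_eq_getElem?_getD, List.getElem?_replicate]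
  split
  · simp [List.getElem?_replicate]
    split <;> simp
  · simp

lemma Shp2_zero (n m : Nat) :
    Shp2 n m (List.replicate (n+1) (List.replicate (m+1) (0:Int))) := by
  refine ⟨by simp, fun i => ?_⟩
  simp only [List.getD_eq_getElem?_getD, List.getElem?_replicate]
  split <;> simp

lemma get2_elem (tb : List (List Int)) (i j : Nat) (h1 : i < tb.length)
    (h2 : j < (tb[i]'h1).length) : (tb[i]'h1)[j]'h2 = get2 tb i j := by
  unfold get2
  rw [List.getD_eq_getElem tb [] h1, List.getD_eq_getElem _ 0 h2]

lemma alt_row (board skill : List (List Int)) (i : Nat) (hi : i < board.length)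
    (h1 : i < (solution_alt board skill).length) :
    (solution_alt board skill)[i]'h1
    = (PySem.List.enumerate (board[i]'hi)).map (fun q => q.2 + bonus skill (i:Int) q.1) := by
  have e : (solution_alt board skill)[i]?
      = some ((PySem.List.enumerate (board[i]'hi)).map
          (fun q => q.2 + bonus skill (i:Int) q.1)) := by
    simp only [solution_alt, List.getElem?_map, PySem.List.getElem?_enumerate,
      List.getElem?_eq_getElem hi, Option.map_some, zero_add]
  rw [List.getElem?_eq_getElem h1] at e
  exact Option.some.inj e

lemma alt_cell (board skill : List (List Int)) (i j : Nat) (hi : i < board.length)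
    (hj : j < (board[i]'hi).length) (h1 : i < (solution_alt board skill).length)
    (h2 : j < ((solution_alt board skill)[i]'h1).length) :
    ((solution_alt board skill)[i]'h1)[j]'h2
    = ((board[i]'hi)[j]'hj) + bonus skill (i:Int) (j:Int) := by
  have e2 : ((solution_alt board skill)[i]'h1)[j]?
      = some (((board[i]'hi)[j]'hj) + bonus skill (i:Int) (j:Int)) := by
    rw [alt_row board skill i hi h1]
    simp only [List.getElem?_map, PySem.List.getElem?_enumerate,
      List.getElem?_eq_getElem hj, Option.map_some, zero_add]
  rw [List.getElem?_eq_getElem h2] at e2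
  exact Option.some.inj e2

lemma main_eq (b0 : List Int) (bs : List (List Int)) (skill : List (List Int))
    (hrows : ∀ row ∈ b0 :: bs, b0.length ≤ row.length)
    (hske : ∀ s ∈ skill, SkillOK (b0 :: bs).length b0.length s) :
    solution (b0 :: bs) skill = solution_alt (b0 :: bs) skill := by
  have hm : ((PySem.List.pyGet? (b0 :: bs) 0).getD []).length = b0.length := by
    simp [PySem.List.pyGet?, PySem.List.pyIdx?]
  simp only [solution, hm]
  set TB1 := skill.foldl stepA
    (List.replicate ((b0 :: bs).length + 1) (List.replicate (b0.length + 1) (0:Int))) with hTB1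
  set TB2 := (List.range ((b0 :: bs).length + 1)).foldl (fun tb i =>
    (List.range b0.length).foldl (fun tb j => updN tb i (j+1) (get2 tb i j)) tb) TB1 with hTB2
  set TB3 := (List.range (b0 :: bs).length).foldl (fun tb i =>
    (List.range (b0.length + 1)).foldl (fun tb j => updN tb (i+1) j (get2 tb i j)) tb) TB2 with hTB3
  have hsh0 := Shp2_zero (b0 :: bs).length b0.length
  have hsh1 : Shp2 (b0 :: bs).length b0.length TB1 :=
    Shp2_skill_fold _ _ skill _ hske hsh0
  have hsh2 : Shp2 (b0 :: bs).length b0.length TB2 :=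
    Shp2_outer2 _ _ TB1 hsh1 ((b0 :: bs).length + 1)
  have hsh3 : Shp2 (b0 :: bs).length b0.length TB3 :=
    foldl_inv _ _ _ (fun tb i h => Shp2_inner3 _ _ tb h i (b0.length + 1)) TB2 hsh2
  have h1get : ∀ i j, get2 TB1 i j = (skill.map (fun s => dlt s i j)).sum := by
    intro i j
    rw [hTB1, skill_fold _ _ skill _ hske hsh0 i j, get2_zero, zero_add]
  have hcell3 : ∀ i j, i < (b0 :: bs).length → j < b0.length →
      get2 TB3 i j = bonus skill (i:Int) (j:Int) := by
    intro i j hi hj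
    rw [hTB3, outer3 _ _ TB2 hsh2 (b0 :: bs).length le_rfl i j, if_pos (by omega)]
    have e2 : ∀ t, t < i + 1 →
        get2 TB2 t j = S (j+1) (fun j' => (skill.map (fun s => dlt s t j')).sum) := by
      intro t ht
      rw [hTB2, outer2 _ _ TB1 hsh1 ((b0 :: bs).length + 1) le_rfl t j,
        if_pos ⟨by omega, by omega⟩]
      exact S_congr (fun u _ => h1get t u)
    rw [S_congr e2]
    have e3 : ∀ t, t < i + 1 →
        S (j+1) (fun j' => (skill.map (fun s => dlt s t j')).sum)
        = (skill.map (fun s => S (j+1) (fun j' => dlt s t j'))).sum :=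
      fun t _ => sum_S_comm skill (j+1) (fun a j' => dlt a t j')
    rw [S_congr e3, sum_S_comm skill (i+1) (fun a t => S (j+1) (fun j' => dlt a t j')),
      List.map_congr_left (fun s hs => dlt_sum (b0 :: bs).length b0.length s (hske s hs) i j),
      ← bonus_eq skill (i:Int) (j:Int)]
  -- final pass
  have hshB : ShpB (b0 :: bs) ((List.range (b0 :: bs).length).foldl (fun bd i =>
      (List.range b0.length).foldl (fun bd j => updN bd i j (get2 TB3 i j)) bd) (b0 :: bs)) :=
    ShpB_outerF (b0 :: bs) (fun i j => get2 TB3 i j) b0.length (b0 :: bs)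
      ⟨rfl, fun t => rfl⟩ (b0 :: bs).length
  have hm' : ∀ t, t < (b0 :: bs).length → b0.length ≤ ((b0 :: bs).getD t []).length := by
    intro t ht
    rw [List.getD_eq_getElem _ [] ht]
    exact hrows _ (List.getElem_mem ht)
  have hF := outerF (b0 :: bs) (fun i j => get2 TB3 i j) b0.length (b0 :: bs)
    ⟨rfl, fun t => rfl⟩ hm' (b0 :: bs).length le_rfl
  simp only [] at hF
  -- bonus vanishes beyond column b0.length
  have hbz : ∀ (i j : Nat), b0.length ≤ j → bonus skill (i:Int) (j:Int) = 0 := by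
    intro i j hj
    exact bonus_zero (b0 :: bs).length b0.length skill hske _ _ (by omega)
  -- extensional equality
  apply List.ext_getElem
  · rw [hshB.1]
    simp [solution_alt, PySem.List.length_enumerate]
  · intro i h1 h2
    have hi' : i < (b0 :: bs).length := hshB.1 ▸ h1
    have hrl : ∀ (hx : i < ((List.range (b0 :: bs).length).foldl (fun bd i =>
        (List.range b0.length).foldl (fun bd j => updN bd i j (get2 TB3 i j)) bd)
        (b0 :: bs)).length),
        (((List.range (b0 :: bs).length).foldl (fun bd i =>
          (List.range b0.length).foldl (fun bd j => updN bd i j (get2 TB3 i j)) bd)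
          (b0 :: bs))[i]'hx).length = ((b0 :: bs)[i]'hi').length := by
      intro hx
      have hsb := hshB.2 i
      rw [List.getD_eq_getElem _ [] hx, List.getD_eq_getElem _ [] hi'] at hsb
      exact hsb
    apply List.ext_getElem
    · rw [hrl h1, alt_row (b0 :: bs) skill i hi' h2]
      simp only [List.length_map, PySem.List.length_enumerate]
    · intro j hj1 hj2
      have hj' : j < ((b0 :: bs)[i]'hi').length := (hrl h1) ▸ hj1
      rw [get2_elem _ i j h1 hj1, hF i j, ← get2_elem (b0 :: bs) i j hi' hj',
        alt_cell (b0 :: bs) skill i j hi' hj' h2 hj2]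
      by_cases hjm : j < b0.length
      · rw [if_pos ⟨hi', hjm⟩, hcell3 i j hi' hjm]
      · rw [if_neg (by omega), hbz i j (by omega)]

-- ===== VERDICT (by name: the statement is the Claim_ definition above) =====
theorem solution_spec : Claim_equal_solution := by
  intro board skill _ hpre
  unfold Spec_solution
  obtain ⟨hne, hrows, hske⟩ := hpre
  cases board with
  | nil => exact absurd rfl hne
  | cons b0 bs => exact main_eq b0 bs skill hrows hske
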